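-- pv_equiv track=rewrite | github.com/andrewens/the-other-guy | the_other_guy.py | do_i_win_this_game
-- ===== SOURCE A (Python) =====
-- def calculate_winning_agent(agent1_card, agent2_card, agent3_card):
--     # if two players play the same card, the other player wins
--     if agent2_card == agent3_card and agent3_card != agent1_card:
--         return 1
--     if agent3_card == agent1_card and agent1_card != agent2_card:
--         return 2
--     if agent1_card == agent2_card and agent2_card != agent3_card:
--         return 3
--
--     # otherwise, the player with the max card wins
--     if agent1_card > max(agent2_card, agent3_card):
--         return 1
--     if agent2_card > max(agent3_card, agent1_card):
--         return 2
--     if agent3_card > max(agent1_card, agent2_card):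
--         return 3
--
--     # if all players play the same card, no one wins
--     return None
--
-- def do_i_win_this_game(auctioned_cards, my_cards, player2_cards, player3_cards, score):
--     # each arg is a tuple or list of cards that were played by each player (+ auction pile) per turn
--     # and score is the preexisting score of each player (optional)
--
--     num_turns = len(auctioned_cards)
--     score = [0, 0, 0] if score is None else list(score) # int (player_index - 1) --> int score (sum of won auctioned cards)
--
--     for i in range(num_turns):
--         winning_agent = calculate_winning_agent(my_cards[i], player2_cards[i], player3_cards[i])
--         if winning_agent is None:
--             continue
--
--         score[winning_agent - 1] += auctioned_cards[i]
--
--     return score[0] > max(score[1], score[2])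
-- ===== SOURCE B (Python) =====
-- def do_i_win_this_game(auctioned_cards, my_cards, player2_cards, player3_cards, score):
--     # staged: (1) per-turn winners via the singleton rule, (2) per-player filtered sums
--     def winner(cards):
--         # a card held by exactly one player is a "singleton"; the highest singleton wins
--         # (odd one out when two players tie, plain max when all distinct, none when all equal)
--         singles = [c for c in cards if cards.count(c) == 1]
--         return cards.index(max(singles)) + 1 if singles else None
--
--     winners = [winner([c1, c2, c3])
--                for c1, c2, c3 in zip(my_cards, player2_cards, player3_cards)]
--     base = [0, 0, 0] if score is None else list(score)
--     totals = [b + sum(a for a, w in zip(auctioned_cards, winners) if w == p)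
--               for p, b in zip((1, 2, 3), base[:3])]
--     return totals[0] > max(totals[1], totals[2])
-- ===== Notes on version B (the rewrite author's own statement) =====
-- stated objective: alternative
-- what changed: B is staged instead of a running tally: it first derives each turn's winner from card multiplicity (a card held by exactly one player is a singleton; the highest singleton's holder wins, none when all three cards are equal), then computes each player's total independently as base score plus the sum of auctioned cards over the turns that player won, replacing A's six-branch comparison chain and mutable 3-slot accumulation loop.
import Mathlib
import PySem

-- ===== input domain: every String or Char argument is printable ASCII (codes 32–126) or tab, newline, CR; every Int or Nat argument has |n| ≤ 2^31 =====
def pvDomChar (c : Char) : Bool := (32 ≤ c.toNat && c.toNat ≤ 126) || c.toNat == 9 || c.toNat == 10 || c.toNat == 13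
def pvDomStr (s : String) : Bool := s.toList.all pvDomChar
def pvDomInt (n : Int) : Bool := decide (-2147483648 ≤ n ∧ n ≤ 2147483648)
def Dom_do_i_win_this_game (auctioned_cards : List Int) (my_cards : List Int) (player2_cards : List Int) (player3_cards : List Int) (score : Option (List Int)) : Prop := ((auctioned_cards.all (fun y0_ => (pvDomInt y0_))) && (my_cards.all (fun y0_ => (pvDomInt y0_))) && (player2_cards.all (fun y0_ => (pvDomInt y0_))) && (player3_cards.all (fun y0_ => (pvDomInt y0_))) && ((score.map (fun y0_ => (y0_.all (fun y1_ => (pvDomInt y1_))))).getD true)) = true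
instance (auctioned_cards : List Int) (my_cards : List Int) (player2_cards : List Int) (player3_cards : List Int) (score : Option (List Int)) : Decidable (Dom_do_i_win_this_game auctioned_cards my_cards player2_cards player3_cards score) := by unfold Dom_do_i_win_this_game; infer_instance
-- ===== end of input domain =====

-- B stages the computation: per-turn winners via a highest-singleton-card rule, then each
-- player's total as a filtered sum over won turns; alternative to A's mutable-tally loop.


-- ===== PORT A =====
def calculate_winning_agent (agent1_card agent2_card agent3_card : Int) : Option Int :=
  if agent2_card == agent3_card && agent3_card != agent1_card then some 1
  else if agent3_card == agent1_card && agent1_card != agent2_card then some 2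
  else if agent1_card == agent2_card && agent2_card != agent3_card then some 3
  else if agent1_card > max agent2_card agent3_card then some 1
  else if agent2_card > max agent3_card agent1_card then some 2
  else if agent3_card > max agent1_card agent2_card then some 3
  else none

-- score[k] += v  (none = IndexError; Python's negative wrap included for exactness)
def aAddAt? (s : List Int) (k : Int) (v : Int) : Option (List Int) :=
  match PySem.List.pyGet? s k with
  | none => none
  | some x => some (s.set (if k < 0 then (s.length + k).toNat else k.toNat) (x + v))

-- loop body for index i (none = an IndexError has occurred)
def aStep (auctioned_cards my_cards player2_cards player3_cards : List Int)
    (st : Option (List Int)) (i : Nat) : Option (List Int) :=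
  match st with
  | none => none
  | some s =>
    match PySem.List.pyGet? my_cards (i : Int), PySem.List.pyGet? player2_cards (i : Int),
          PySem.List.pyGet? player3_cards (i : Int), PySem.List.pyGet? auctioned_cards (i : Int) with
    | some c1, some c2, some c3, some a =>
      match calculate_winning_agent c1 c2 c3 with
      | none => some s
      | some w => aAddAt? s (w - 1) a
    | _, _, _, _ => none

def do_i_win_this_game (auctioned_cards : List Int) (my_cards : List Int) (player2_cards : List Int) (player3_cards : List Int) (score : Option (List Int)) : Bool :=
  let num_turns := auctioned_cards.length
  let s0 : List Int := match score with | none => [0, 0, 0] | some s => s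
  match (List.range num_turns).foldl (aStep auctioned_cards my_cards player2_cards player3_cards) (some s0) with
  | none => false  -- unreachable under Pre_ (Python raises)
  | some s =>
    match PySem.List.pyGet? s 0, PySem.List.pyGet? s 1, PySem.List.pyGet? s 2 with
    | some x, some y, some z => decide (x > max y z)
    | _, _, _ => false  -- unreachable under Pre_ (Python raises)

-- ===== PORT B =====
-- winner(cards) of Source B: singletons (cards held by exactly one player), highest singleton wins
def bWinner (c1 c2 c3 : Int) : Option Int :=
  let cards : List Int := [c1, c2, c3]
  let singles := cards.filter (fun c => PySem.List.count cards c == 1)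
  match PySem.List.max? singles (fun x => x) with
  | none => none
  | some m =>
    match PySem.List.index? cards m with
    | none => none  -- unreachable: the max of singles is a member of cards
    | some i => some ((i : Int) + 1)

-- sum(a for a, w in zip(auctioned_cards, winners) if w == p)
def bSum (ts : List (Int × Option Int)) (p : Int) : Int :=
  ts.foldl (fun acc aw => if aw.2 == some p then acc + aw.1 else acc) 0

def do_i_win_this_game_alt (auctioned_cards : List Int) (my_cards : List Int) (player2_cards : List Int) (player3_cards : List Int) (score : Option (List Int)) : Bool :=
  let winners := (my_cards.zip (player2_cards.zip player3_cards)).map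
    (fun t => bWinner t.1 t.2.1 t.2.2)
  let base : List Int := match score with | none => [0, 0, 0] | some s => s
  let ts := auctioned_cards.zip winners
  let totals := (([(1 : Int), 2, 3]).zip (PySem.List.slice base (some 0) (some 3))).map
    (fun pb => pb.2 + bSum ts pb.1)
  match PySem.List.pyGet? totals 0, PySem.List.pyGet? totals 1, PySem.List.pyGet? totals 2 with
  | some x, some y, some z => decide (x > max y z)
  | _, _, _ => false  -- unreachable under Pre_

-- ===== PRECONDITION & SPEC =====
-- Pre_ = exactly the inputs on which Python A returns: every player list covers all turns
-- (else my_cards[i]/… raises IndexError) and a given score has at least 3 entries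
-- (else score[2] in the final comparison, or score[winner-1], raises IndexError).
def Pre_do_i_win_this_game (auctioned_cards : List Int) (my_cards : List Int) (player2_cards : List Int) (player3_cards : List Int) (score : Option (List Int)) : Prop :=
  auctioned_cards.length ≤ my_cards.length ∧ auctioned_cards.length ≤ player2_cards.length ∧
  auctioned_cards.length ≤ player3_cards.length ∧
  (match score with | none => true | some s => decide (3 ≤ s.length)) = true
instance (auctioned_cards : List Int) (my_cards : List Int) (player2_cards : List Int) (player3_cards : List Int) (score : Option (List Int)) : Decidable (Pre_do_i_win_this_game auctioned_cards my_cards player2_cards player3_cards score) := by unfold Pre_do_i_win_this_game; infer_instance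
def pvWitness_do_i_win_this_game : List Int × List Int × List Int × List Int × Option (List Int) :=
  ([4, 2], [1, 5], [1, 3], [2, 3], some [1, 0, 0])

def Spec_do_i_win_this_game (auctioned_cards : List Int) (my_cards : List Int) (player2_cards : List Int) (player3_cards : List Int) (score : Option (List Int)) (out : Bool) : Prop := out = do_i_win_this_game_alt auctioned_cards my_cards player2_cards player3_cards score
instance (auctioned_cards : List Int) (my_cards : List Int) (player2_cards : List Int) (player3_cards : List Int) (score : Option (List Int)) (out : Bool) : Decidable (Spec_do_i_win_this_game auctioned_cards my_cards player2_cards player3_cards score out) := by unfold Spec_do_i_win_this_game; infer_instance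

-- ===== CLAIM (what is proved, stated in full; the proofs are below) =====
def Claim_equal_do_i_win_this_game : Prop := ∀ (auctioned_cards : List Int) (my_cards : List Int) (player2_cards : List Int) (player3_cards : List Int) (score : Option (List Int)), Dom_do_i_win_this_game auctioned_cards my_cards player2_cards player3_cards score → Pre_do_i_win_this_game auctioned_cards my_cards player2_cards player3_cards score → Spec_do_i_win_this_game auctioned_cards my_cards player2_cards player3_cards score (do_i_win_this_game auctioned_cards my_cards player2_cards player3_cards score)

-- ===== LEMMAS AND PROOFS =====

-- per-turn winner: A's comparison chain and B's highest-singleton rule agree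
lemma winner_eq (c1 c2 c3 : Int) : calculate_winning_agent c1 c2 c3 = bWinner c1 c2 c3 := by
  unfold calculate_winning_agent bWinner
  by_cases h12 : c1 = c2 <;> by_cases h23 : c2 = c3 <;> by_cases h13 : c1 = c3
  · subst h12 h23; simp [PySem.List.count, List.count_cons, PySem.List.max?]
  · exact absurd (h12.trans h23) h13
  · exact absurd (h12.symm.trans h13) h23
  · -- c1 = c2 ≠ c3: player 3 holds the unique card
    subst h12
    simp [PySem.List.count, List.count_cons, h23, Ne.symm h23, PySem.List.max?,
      PySem.List.index?, List.idxOf?, List.findIdx?_cons]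
  · exact absurd (h13.trans h23.symm) h12
  · -- c2 = c3 ≠ c1: player 1 holds the unique card
    subst h23
    simp [PySem.List.count, List.count_cons, h12, Ne.symm h12, PySem.List.max?,
      PySem.List.index?, List.idxOf?, List.findIdx?_cons]
  · -- c1 = c3 ≠ c2: player 2 holds the unique card
    subst h13
    simp [PySem.List.count, List.count_cons, h12, Ne.symm h12, PySem.List.max?,
      PySem.List.index?, List.idxOf?, List.findIdx?_cons]
  · -- all distinct: all three cards are singletons, so the max card's holder wins
    by_cases ha : c1 > max c2 c3
    · simp [h12, h23, h13, Ne.symm h12, Ne.symm h23, Ne.symm h13, ha,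
        PySem.List.count, List.count_cons, PySem.List.max?_id_cons,
        show List.foldl max c1 [c2,c3] = c1 by simp [List.foldl]; omega,
        PySem.List.index?, List.idxOf?, List.findIdx?_cons]
    · by_cases hb : c2 > max c3 c1
      · simp [h12, h23, h13, Ne.symm h12, Ne.symm h23, Ne.symm h13, ha, hb,
          PySem.List.count, List.count_cons, PySem.List.max?_id_cons,
          show List.foldl max c1 [c2,c3] = c2 by simp [List.foldl]; omega,
          PySem.List.index?, List.idxOf?, List.findIdx?_cons]
      · by_cases hc : c3 > max c1 c2
        · simp [h12, h23, h13, Ne.symm h12, Ne.symm h23, Ne.symm h13, ha, hb, hc,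
            PySem.List.count, List.count_cons, PySem.List.max?_id_cons,
            show List.foldl max c1 [c2,c3] = c3 by simp [List.foldl]; omega,
            PySem.List.index?, List.idxOf?, List.findIdx?_cons]
        · exfalso; omega

-- bWinner only ever returns none / some 1 / some 2 / some 3
lemma bWinner_cases (c1 c2 c3 : Int) :
    bWinner c1 c2 c3 = none ∨ bWinner c1 c2 c3 = some 1 ∨
    bWinner c1 c2 c3 = some 2 ∨ bWinner c1 c2 c3 = some 3 := by
  rw [← winner_eq]
  unfold calculate_winning_agent; split_ifs <;> simp

-- folding bSum's step from a shifted accumulator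
lemma bSum_shift (p : Int) : ∀ (ts : List (Int × Option Int)) (a b : Int),
    ts.foldl (fun acc aw => if aw.2 == some p then acc + aw.1 else acc) (a + b) =
      a + ts.foldl (fun acc aw => if aw.2 == some p then acc + aw.1 else acc) b := by
  intro ts
  induction ts with
  | nil => intro a b; rfl
  | cons hd tl ih =>
    intro a b
    simp only [List.foldl_cons]
    have h : (if (hd.2 == some p) = true then a + b + hd.1 else a + b) =
        a + (if (hd.2 == some p) = true then b + hd.1 else b) := by split <;> ring
    rw [h, ih]

-- bSum over a cons
lemma bSum_cons (a : Int) (w : Option Int) (ts : List (Int × Option Int)) (p : Int) :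
    bSum ((a, w) :: ts) p = (if w == some p then a else 0) + bSum ts p := by
  simp only [bSum, List.foldl_cons]
  have h : (if (w == some p) = true then (0 : Int) + a else 0) =
      (if (w == some p) = true then a else 0) + 0 := by split <;> ring
  rw [h, bSum_shift]

-- shifting A's index by one steps to the tails of all four lists
lemma step_succ (a m x y : Int) (as ms xs ys : List Int) (st : Option (List Int)) (i : Nat) :
    aStep (a :: as) (m :: ms) (x :: xs) (y :: ys) st (Nat.succ i) = aStep as ms xs ys st i := by
  unfold aStep
  simp [PySem.List.pyGet?_natCast]

-- A's indexed accumulation loop computes exactly B's three per-player filtered sums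
lemma loopA : ∀ (auct my p2 p3 : List Int) (x y z : Int) (r : List Int),
    auct.length ≤ my.length → auct.length ≤ p2.length → auct.length ≤ p3.length →
    (List.range auct.length).foldl (aStep auct my p2 p3) (some (x :: y :: z :: r)) =
      some ((x + bSum (auct.zip ((my.zip (p2.zip p3)).map (fun t => bWinner t.1 t.2.1 t.2.2))) 1)
        :: (y + bSum (auct.zip ((my.zip (p2.zip p3)).map (fun t => bWinner t.1 t.2.1 t.2.2))) 2)
        :: (z + bSum (auct.zip ((my.zip (p2.zip p3)).map (fun t => bWinner t.1 t.2.1 t.2.2))) 3)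
        :: r) := by
  intro auct
  induction auct with
  | nil => intro my p2 p3 x y z r _ _ _; simp [bSum]
  | cons a as ih =>
    intro my p2 p3 x y z r h1 h2 h3
    match my, p2, p3 with
    | m :: ms, p :: ps, q :: qs =>
      simp only [List.length_cons] at h1 h2 h3
      rw [List.length_cons, List.range_succ_eq_map]
      simp only [List.foldl_cons, List.foldl_map, List.zip_cons_cons, List.map_cons]
      have hfun : (fun (st : Option (List Int)) (i : Nat) =>
          aStep (a :: as) (m :: ms) (p :: ps) (q :: qs) st (Nat.succ i)) = aStep as ms ps qs := by
        funext st i; exact step_succ a m p q as ms ps qs st i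
      rw [hfun]
      have hstep : ∀ st : List Int, aStep (a :: as) (m :: ms) (p :: ps) (q :: qs) (some st) 0 =
          match calculate_winning_agent m p q with
          | none => some st
          | some w => aAddAt? st (w - 1) a := by
        intro st
        unfold aStep
        simp
      rcases bWinner_cases m p q with h | h | h | h <;>
        rw [hstep, winner_eq, h] <;> dsimp only <;>
        [skip;
         rw [show aAddAt? (x :: y :: z :: r) (1 - 1) a = some ((x + a) :: y :: z :: r) by
           simp [aAddAt?, PySem.List.pyGet?, PySem.List.pyIdx?,
             show (0 : Int) ≤ ((r.length : Int) + 1 + 1) from by omega]];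
         rw [show aAddAt? (x :: y :: z :: r) (2 - 1) a = some (x :: (y + a) :: z :: r) by
           simp [aAddAt?, PySem.List.pyGet?, PySem.List.pyIdx?,
             show (0 : Int) ≤ ((r.length : Int) + 1) from by omega]];
         rw [show aAddAt? (x :: y :: z :: r) (3 - 1) a = some (x :: y :: (z + a) :: r) by
           simp [aAddAt?, PySem.List.pyGet?, PySem.List.pyIdx?,
             show (2 : Int) ≤ ((r.length : Int) + 1 + 1) from by omega]]] <;>
        rw [ih ms ps qs _ _ _ r (by omega) (by omega) (by omega)] <;>
        simp [bSum_cons, Int.add_assoc]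

-- ===== VERDICT (by name: the statement is the Claim_ definition above) =====
theorem do_i_win_this_game_spec : Claim_equal_do_i_win_this_game := by
  intro auct my p2 p3 score _ hpre
  obtain ⟨h1, h2, h3, hs⟩ := hpre
  unfold Spec_do_i_win_this_game do_i_win_this_game do_i_win_this_game_alt
  match score with
  | none =>
    dsimp only
    rw [loopA auct my p2 p3 0 0 0 [] h1 h2 h3]
    simp [PySem.List.pyGet?, PySem.List.pyIdx?, PySem.List.slice]
  | some s =>
    simp only [decide_eq_true_eq] at hs
    match s, hs with
    | b0 :: b1 :: b2 :: r, _ =>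
      dsimp only
      rw [loopA auct my p2 p3 b0 b1 b2 r h1 h2 h3]
      simp [PySem.List.pyGet?, PySem.List.pyIdx?, PySem.List.slice,
        show (0 : Int) ≤ ((r.length : Int) + 1 + 1) from by omega,
        show (0 : Int) ≤ ((r.length : Int) + 1) from by omega,
        show (2 : Int) ≤ ((r.length : Int) + 1 + 1) from by omega]
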